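-- pv_equiv track=rewrite | github.com/syedtaz/dsa | src/leetcode/900-999/911.py | _generate_winners
-- ===== SOURCE A (Python) =====
-- from typing import List, NamedTuple
-- import heapq
--
-- class Candidate:
--     id: int
--     votes: int
--     time: int
--     seq: int
--
--     def __init__(self, id: int, votes: int, time: int, seq: int) -> None:
--         self.id, self.votes, self.time, self.seq = id, votes, time, seq
--
-- Winner = NamedTuple("Winner", [("time", int), ("id", int)])
--
-- def _generate_winners(persons: List[int], times: List[int]) -> list[Winner]:
--     heap = [(time, person) for time, person in zip(times, persons)]
--     heapq.heapify(heap)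
--     state: dict[int, Candidate] = {}
--     acc: list[Winner] = []
--     seqnum = 0
--
--     def insert_or_add(id: int, time: int, seq: int) -> None:
--         if id not in state:
--             state[id] = Candidate(id=id, votes=1, time=time, seq=seq)
--             return
--
--         state[id].votes += 1
--         state[id].time = time
--         state[id].seq = seq
--
--     while len(heap) > 0:
--         time_min, person_min = heapq.heappop(heap)
--         insert_or_add(person_min, time_min, seqnum)
--         seqnum += 1
--
--         while len(heap) > 0 and heap[0][0] == time_min:
--             _, person = heapq.heappop(heap)
--             insert_or_add(person, time_min, seqnum)
--             seqnum += 1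
--
--         max_votes = max(cand.votes for cand in state.values())
--         candidates = [x for x in state.values() if x.votes == max_votes]
--         choice = max(candidates, key=lambda x: x.seq)
--         acc.append(Winner(time=time_min, id=choice.id))
--
--     return acc
-- ===== SOURCE B (Python) =====
-- def _generate_winners(persons, times):
--     # Same winners, computed incrementally: sort the (time, person) events once,
--     # keep running vote counts and the current leader (a freshly voted person takes
--     # the lead when it reaches at least the leader's count), and emit/overwrite one
--     # entry per time.  O(n log n) instead of a full scan of the tally per time.
--     events = sorted(zip(times, persons))
--     counts = {}
--     leader = None
--     acc = []
--     for t, p in events: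
--         counts[p] = counts.get(p, 0) + 1
--         if leader is None or counts[p] >= counts[leader]:
--             leader = p
--         if acc and acc[-1][0] == t:
--             acc[-1] = (t, leader)
--         else:
--             acc.append((t, leader))
--     return acc
-- ===== Notes on version B (the rewrite author's own statement) =====
-- stated objective: faster
-- what changed: Replaces A's heap plus per-time full rescan of the tally (max votes, filter, max seq) with one sort of the (time, person) events and an incrementally maintained leader (a freshly voted person takes the lead when its count reaches the leader's), overwriting the last output entry within a time group.
import Mathlib
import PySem

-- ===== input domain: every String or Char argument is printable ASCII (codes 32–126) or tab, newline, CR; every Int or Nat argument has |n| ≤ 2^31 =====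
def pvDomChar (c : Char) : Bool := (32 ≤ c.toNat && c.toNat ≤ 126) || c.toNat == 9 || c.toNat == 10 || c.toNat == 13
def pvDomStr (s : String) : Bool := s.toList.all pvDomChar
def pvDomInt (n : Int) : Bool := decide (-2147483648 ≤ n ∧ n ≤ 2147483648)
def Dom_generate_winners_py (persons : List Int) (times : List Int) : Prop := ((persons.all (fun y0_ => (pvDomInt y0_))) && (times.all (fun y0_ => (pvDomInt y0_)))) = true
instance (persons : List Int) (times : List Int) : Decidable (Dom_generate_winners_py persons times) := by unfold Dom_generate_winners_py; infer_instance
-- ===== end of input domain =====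

-- B replaces A's per-time full scan of the tally (max votes, filter, max seq) by an
-- incrementally maintained leader over the once-sorted events (objective: faster).

-- ===== PORT A =====
-- the Candidate record of A
structure Cand where
  id : Int
  votes : Int
  time : Int
  seq : Int
deriving DecidableEq, Repr

-- insert_or_add: new candidate with 1 vote, or votes += 1 and time/seq refreshed
def insertOrAdd (state : PySem.Dict Int Cand) (id : Int) (time : Int) (seq : Int) : PySem.Dict Int Cand :=
  match state.get? id with
  | none => state.insert id ⟨id, 1, time, seq⟩
  | some c => state.insert id ⟨c.id, c.votes + 1, time, seq⟩

-- max(cand.votes …), [x for x in … if x.votes == max_votes], max(candidates, key=seq), choice.id;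
-- the .getD defaults are never used: A evaluates this only with a nonempty state
def winnerChoice (state : PySem.Dict Int Cand) : Int :=
  let maxVotes := (PySem.List.max? (state.values.map (fun c => c.votes)) (fun v => v)).getD 0
  let candidates := state.values.filter (fun c => c.votes == maxVotes)
  ((PySem.List.max? candidates (fun c => c.seq)).getD ⟨0, 0, 0, 0⟩).id

-- A's while loop: pop the minimum, pop the rest of its time group, record the winner
def aLoop (heap : List (Int × Int)) (state : PySem.Dict Int Cand) (acc : List (Int × Int)) (seqnum : Int) : List (Int × Int) :=
  match heap with
  | [] => acc
  | (tmin, pmin) :: rest =>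
    let st1 := insertOrAdd state pmin tmin seqnum
    let grp := rest.takeWhile (fun e => e.1 == tmin)
    let rest' := rest.dropWhile (fun e => e.1 == tmin)
    let sg := grp.foldl (fun (s : PySem.Dict Int Cand × Int) e => (insertOrAdd s.1 e.2 tmin s.2, s.2 + 1)) (st1, seqnum + 1)
    aLoop rest' sg.1 (acc ++ [(tmin, winnerChoice sg.1)]) sg.2
termination_by heap.length
decreasing_by
  simp only [List.length_cons]
  exact Nat.lt_succ_of_le (List.length_dropWhile_le _ _)

-- heapify + heappop to exhaustion yields the (time, person) tuples in nondecreasing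
-- tuple order — exact here, since equal Int tuples are identical values
def generate_winners_py (persons : List Int) (times : List Int) : List (Int × Int) :=
  aLoop (PySem.List.sorted2 (times.zip persons) (fun e => e.1) (fun e => e.2)) PySem.Dict.empty [] 0

-- ===== PORT B =====
-- 'if acc and acc[-1][0] == t: acc[-1] = (t, leader) else: acc.append((t, leader))'
def bUpd (acc : List (Int × Int)) (t : Int) (leader : Int) : List (Int × Int) :=
  match acc.getLast? with
  | some last => if last.1 == t then acc.dropLast ++ [(t, leader)] else acc ++ [(t, leader)]
  | none => [(t, leader)]

-- one event of B's loop over (counts, leader, acc)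
def bStep (s : PySem.Dict Int Int × Option Int × List (Int × Int)) (e : Int × Int) :
    PySem.Dict Int Int × Option Int × List (Int × Int) :=
  let counts := s.1.insert e.2 (s.1.getD e.2 0 + 1)
  let leader : Int :=
    match s.2.1 with
    | none => e.2
    | some L => if counts.getD L 0 ≤ counts.getD e.2 0 then e.2 else L
  (counts, some leader, bUpd s.2.2 e.1 leader)

def generate_winners_py_alt (persons : List Int) (times : List Int) : List (Int × Int) :=
  ((PySem.List.sorted2 (times.zip persons) (fun e => e.1) (fun e => e.2)).foldl bStep
    (PySem.Dict.empty, none, [])).2.2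

-- ===== PRECONDITION & SPEC =====
def Spec_generate_winners_py (persons : List Int) (times : List Int) (out : List (Int × Int)) : Prop := out = generate_winners_py_alt persons times
instance (persons : List Int) (times : List Int) (out : List (Int × Int)) : Decidable (Spec_generate_winners_py persons times out) := by unfold Spec_generate_winners_py; infer_instance

-- ===== CLAIM (what is proved, stated in full; the proofs are below) =====
def Claim_equal_generate_winners_py : Prop := ∀ (persons : List Int) (times : List Int), Dom_generate_winners_py persons times → Spec_generate_winners_py persons times (generate_winners_py persons times)

-- ===== LEMMAS AND PROOFS =====

-- votes of a person in A's state (0 when absent)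
def votesOf (st : PySem.Dict Int Cand) (p : Int) : Int :=
  match st.get? p with
  | some c => c.votes
  | none => 0

-- the lexicographic (votes, seq) maximum — what A's three-stage scan selects
def IsChoice (st : PySem.Dict Int Cand) (c : Cand) : Prop :=
  c ∈ st.values ∧ (∀ d ∈ st.values, d.votes ≤ c.votes) ∧
    (∀ d ∈ st.values, d.votes = c.votes → d.seq ≤ c.seq)

-- A's loop, flattened to one step per event, with B's emit discipline
def sRun : List (Int × Int) → PySem.Dict Int Cand → Int → List (Int × Int) → List (Int × Int)
  | [], _, _, acc => acc
  | e :: es, st, sq, acc =>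
    let st' := insertOrAdd st e.2 e.1 sq
    sRun es st' (sq + 1) (bUpd acc e.1 (winnerChoice st'))

-- StInv: invariant tying A's state to B's (counts, leader)
def StInv (st : PySem.Dict Int Cand) (sq : Int) (counts : PySem.Dict Int Int) (L? : Option Int) : Prop :=
  (∀ p, counts.getD p 0 = votesOf st p) ∧
  (∀ k c, st.get? k = some c → c.id = k ∧ c.seq < sq) ∧
  (∀ k₁ k₂ c₁ c₂, k₁ ≠ k₂ → st.get? k₁ = some c₁ → st.get? k₂ = some c₂ → c₁.seq ≠ c₂.seq) ∧
  st.keys.Nodup ∧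
  (match L? with
   | none => st.items = []
   | some L => st.items ≠ [] ∧ ∃ c, st.get? L = some c ∧ IsChoice st c ∧ c.id = L)

-- the strict-lex "before" test sorted2 sorts with, specialised to events
def evBefore (a b : Int × Int) : Bool :=
  decide (a.1 < b.1) || (!decide (b.1 < a.1) && decide (a.2 < b.2))

theorem insertBy_pairwise_fst (x : Int × Int) (l : List (Int × Int))
    (h : l.Pairwise (fun a b => a.1 ≤ b.1)) :
    (PySem.List.insertBy evBefore x l).Pairwise (fun a b => a.1 ≤ b.1) := by
  induction l with
  | nil => rw [PySem.List.insertBy]; simp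
  | cons y ys ih =>
    rw [PySem.List.insertBy]
    rcases List.pairwise_cons.mp h with ⟨hy, hys⟩
    cases hc : evBefore x y with
    | true =>
      have hxy : x.1 ≤ y.1 := by simp [evBefore] at hc; omega
      simp only [if_pos]
      refine List.pairwise_cons.mpr ⟨?_, h⟩
      intro z hz
      rcases List.mem_cons.mp hz with rfl | hz'
      · exact hxy
      · exact le_trans hxy (hy z hz')
    | false =>
      have hyx : y.1 ≤ x.1 := by simp [evBefore] at hc; omega
      simp only [Bool.false_eq_true, if_neg, not_false_iff]
      refine List.pairwise_cons.mpr ⟨?_, ih hys⟩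
      intro z hz
      rcases (PySem.List.mem_insertBy _ _ _ _).mp hz with rfl | hz'
      · exact hyx
      · exact hy z hz'

theorem foldl_insertBy_pairwise_fst (xs : List (Int × Int)) : ∀ (acc : List (Int × Int)),
    acc.Pairwise (fun a b => a.1 ≤ b.1) →
    (xs.foldl (fun acc x => PySem.List.insertBy evBefore x acc) acc).Pairwise (fun a b => a.1 ≤ b.1) := by
  induction xs with
  | nil => intro acc h; simpa using h
  | cons x xs ih => intro acc h; exact ih _ (insertBy_pairwise_fst x acc h)

theorem sorted2_pairwise_fst (xs : List (Int × Int)) :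
    (PySem.List.sorted2 xs (fun e => e.1) (fun e => e.2)).Pairwise (fun a b => a.1 ≤ b.1) := by
  show (xs.foldl (fun acc x => PySem.List.insertBy evBefore x acc) []).Pairwise (fun a b => a.1 ≤ b.1)
  exact foldl_insertBy_pairwise_fst xs [] (by simp)

-- membership in values ↔ get? hit (keys nodup)
theorem mem_values_iff_get? (st : PySem.Dict Int Cand) (hnd : st.keys.Nodup) (d : Cand) :
    d ∈ st.values ↔ ∃ k, st.get? k = some d := by
  constructor
  · intro hd
    simp only [PySem.Dict.values, List.mem_map] at hd
    obtain ⟨kv, hkv, rfl⟩ := hd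
    exact ⟨kv.1, (PySem.Dict.get?_eq_some_iff_mem_items st kv.1 kv.2 hnd).mpr (by simpa using hkv)⟩
  · rintro ⟨k, hk⟩
    have hm := (PySem.Dict.get?_eq_some_iff_mem_items st k d hnd).mp hk
    simp only [PySem.Dict.values, List.mem_map]
    exact ⟨(k, d), hm, rfl⟩

theorem keys_insert_nodup (st : PySem.Dict Int Cand) (k : Int) (v : Cand)
    (hnd : st.keys.Nodup) : (st.insert k v).keys.Nodup := by
  simp only [PySem.Dict.keys, PySem.Dict.items_insert]
  by_cases hc : st.contains k = true
  · simp only [hc, if_pos]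
    have : (st.items.map (fun p => if (p.1 == k) = true then (k, v) else p)).map (fun x => x.1)
        = st.items.map (fun x => x.1) := by
      rw [List.map_map]
      refine List.map_congr_left ?_
      intro p _
      by_cases h : p.1 = k <;> simp [h]
    rw [this]; exact hnd
  · simp only [hc, if_neg, Bool.false_eq_true, not_false_iff, List.map_append]
    have hk : k ∉ st.items.map (fun x => x.1) := by
      intro hmem
      apply hc
      simp only [PySem.Dict.contains, List.any_eq_true]
      obtain ⟨p, hp, hpk⟩ := List.mem_map.mp hmem
      exact ⟨p, hp, by simp [hpk]⟩
    simp only [List.map_cons, List.map_nil]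
    rw [List.nodup_middle]
    simp only [List.append_nil]
    exact List.nodup_cons.mpr ⟨hk, hnd⟩

-- what winnerChoice computes: the id of an IsChoice element
theorem winnerChoice_isChoice (st : PySem.Dict Int Cand) (h : st.values ≠ []) :
    ∃ c, IsChoice st c ∧ winnerChoice st = c.id := by
  obtain ⟨mv, hmv⟩ : ∃ mv, PySem.List.max? (st.values.map (fun c => c.votes)) (fun v => v) = some mv := by
    cases hmax : PySem.List.max? (st.values.map (fun c => c.votes)) (fun v => v) with
    | none => exact absurd ((PySem.List.max?_eq_none_iff _ _).mp hmax) (by simp [h])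
    | some m => exact ⟨m, rfl⟩
  have hmax : ∀ d ∈ st.values, d.votes ≤ mv := by
    intro d hd
    exact PySem.List.max?_isMax hmv _ (List.mem_map.mpr ⟨d, hd, rfl⟩)
  obtain ⟨c0, hc0, hc0v⟩ := List.mem_map.mp (PySem.List.max?_mem hmv)
  have hc0f : c0 ∈ st.values.filter (fun c => c.votes == mv) := by
    simp [List.mem_filter, hc0, hc0v]
  obtain ⟨ch, hch⟩ : ∃ ch, PySem.List.max? (st.values.filter (fun c => c.votes == mv)) (fun c => c.seq) = some ch := by
    cases hm2 : PySem.List.max? (st.values.filter (fun c => c.votes == mv)) (fun c => c.seq) with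
    | none =>
      exact absurd ((PySem.List.max?_eq_none_iff _ _).mp hm2) (by intro hnil; rw [hnil] at hc0f; simp at hc0f)
    | some m => exact ⟨m, rfl⟩
  have hchf := PySem.List.max?_mem hch
  have hchv : ch.votes = mv := by simpa using (List.mem_filter.mp hchf).2
  refine ⟨ch, ⟨(List.mem_filter.mp hchf).1, fun d hd => hchv ▸ hmax d hd, ?_⟩, ?_⟩
  · intro d hd hdv
    refine PySem.List.max?_isMax hch d (List.mem_filter.mpr ⟨hd, ?_⟩)
    simp [hdv, hchv]
  · simp only [winnerChoice, hmv, hch, Option.getD_some]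

-- uniqueness of the choice id under the seq invariants
theorem isChoice_id_unique (st : PySem.Dict Int Cand) (hnd : st.keys.Nodup)
    (hseq : ∀ k₁ k₂ c₁ c₂, k₁ ≠ k₂ → st.get? k₁ = some c₁ → st.get? k₂ = some c₂ → c₁.seq ≠ c₂.seq)
    (c₁ c₂ : Cand) (h₁ : IsChoice st c₁) (h₂ : IsChoice st c₂) : c₁.id = c₂.id := by
  obtain ⟨hm₁, hv₁, hs₁⟩ := h₁
  obtain ⟨hm₂, hv₂, hs₂⟩ := h₂
  have hveq : c₁.votes = c₂.votes := le_antisymm (hv₂ c₁ hm₁) (hv₁ c₂ hm₂)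
  have hseq' : c₁.seq = c₂.seq := le_antisymm (hs₂ c₁ hm₁ hveq) (hs₁ c₂ hm₂ hveq.symm)
  obtain ⟨k₁, hk₁⟩ := (mem_values_iff_get? st hnd c₁).mp hm₁
  obtain ⟨k₂, hk₂⟩ := (mem_values_iff_get? st hnd c₂).mp hm₂
  by_cases hkk : k₁ = k₂
  · subst hkk
    rw [hk₁] at hk₂
    rw [Option.some_inj.mp hk₂]
  · exact absurd hseq' (hseq k₁ k₂ c₁ c₂ hkk hk₁ hk₂)

-- B's step computes winnerChoice of the updated state as its leader, and StInv is preserved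
theorem bStep_inv (st : PySem.Dict Int Cand) (sq : Int) (counts : PySem.Dict Int Int)
    (L? : Option Int) (acc : List (Int × Int)) (t p : Int) (hInv : StInv st sq counts L?) :
    bStep (counts, L?, acc) (t, p) =
      (counts.insert p (counts.getD p 0 + 1), some (winnerChoice (insertOrAdd st p t sq)),
        bUpd acc t (winnerChoice (insertOrAdd st p t sq))) ∧
    StInv (insertOrAdd st p t sq) (sq + 1) (counts.insert p (counts.getD p 0 + 1))
      (some (winnerChoice (insertOrAdd st p t sq))) := by
  obtain ⟨hcnt, hwf, hseq, hnd, hL⟩ := hInv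
  have hst' : insertOrAdd st p t sq = st.insert p ⟨p, votesOf st p + 1, t, sq⟩ := by
    unfold insertOrAdd votesOf
    cases hg : st.get? p with
    | none => simp
    | some c => simp [(hwf p c hg).1]
  rw [hst']
  set nc : Cand := (⟨p, votesOf st p + 1, t, sq⟩ : Cand) with hnc
  have hget'p : (st.insert p nc).get? p = some nc := PySem.Dict.get?_insert_self st p nc
  have hget'ne : ∀ q, q ≠ p → (st.insert p nc).get? q = st.get? q :=
    fun q hq => PySem.Dict.get?_insert_of_ne st nc hq
  have hvot'p : votesOf (st.insert p nc) p = votesOf st p + 1 := by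
    unfold votesOf; rw [hget'p]; rfl
  have hvot'ne : ∀ q, q ≠ p → votesOf (st.insert p nc) q = votesOf st q := by
    intro q hq; unfold votesOf; rw [hget'ne q hq]
  have hnd' : (st.insert p nc).keys.Nodup := keys_insert_nodup st p nc hnd
  have hvals : ∀ d, d ∈ (st.insert p nc).values ↔ (d = nc ∨ ∃ q, q ≠ p ∧ st.get? q = some d) := by
    intro d
    rw [mem_values_iff_get? _ hnd']
    constructor
    · rintro ⟨k, hk⟩
      by_cases hkp : k = p
      · subst hkp; rw [hget'p] at hk; exact Or.inl (Option.some_inj.mp hk).symm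
      · exact Or.inr ⟨k, hkp, (hget'ne k hkp) ▸ hk⟩
    · rintro (rfl | ⟨q, hq, hgq⟩)
      · exact ⟨p, hget'p⟩
      · exact ⟨q, by rw [hget'ne q hq]; exact hgq⟩
  have hwf' : ∀ k c, (st.insert p nc).get? k = some c → c.id = k ∧ c.seq < sq + 1 := by
    intro k c hk
    by_cases hkp : k = p
    · subst hkp; rw [hget'p] at hk
      rw [← Option.some_inj.mp hk]
      exact ⟨rfl, by show sq < sq + 1; omega⟩
    · rw [hget'ne k hkp] at hk
      exact ⟨(hwf k c hk).1, by have := (hwf k c hk).2; omega⟩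
  have hseq' : ∀ k₁ k₂ c₁ c₂, k₁ ≠ k₂ → (st.insert p nc).get? k₁ = some c₁ →
      (st.insert p nc).get? k₂ = some c₂ → c₁.seq ≠ c₂.seq := by
    intro k₁ k₂ c₁ c₂ hne h1 h2
    by_cases h1p : k₁ = p
    · subst h1p
      rw [hget'p] at h1
      rw [hget'ne k₂ (Ne.symm hne)] at h2
      rw [← Option.some_inj.mp h1]
      have := (hwf k₂ c₂ h2).2
      simp only [hnc]; omega
    · by_cases h2p : k₂ = p
      · subst h2p
        rw [hget'p] at h2
        rw [hget'ne k₁ h1p] at h1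
        rw [← Option.some_inj.mp h2]
        have := (hwf k₁ c₁ h1).2
        simp only [hnc]; omega
      · rw [hget'ne k₁ h1p] at h1
        rw [hget'ne k₂ h2p] at h2
        exact hseq k₁ k₂ c₁ c₂ hne h1 h2
  have hcnt' : ∀ q, (counts.insert p (counts.getD p 0 + 1)).getD q 0 = votesOf (st.insert p nc) q := by
    intro q
    rw [PySem.Dict.getD_insert]
    by_cases hq : q = p
    · subst hq; rw [if_pos rfl, hvot'p, hcnt q]
    · rw [if_neg hq, hvot'ne q hq, hcnt q]
  have hne' : (st.insert p nc).values ≠ [] := by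
    intro h0
    have := (hvals nc).mpr (Or.inl rfl)
    rw [h0] at this
    simp at this
  have hitems' : (st.insert p nc).items ≠ [] := by
    intro h0
    apply hne'
    simp [PySem.Dict.values, h0]
  obtain ⟨cw, hcw, hcwid⟩ := winnerChoice_isChoice (st.insert p nc) hne'
  have hfinish : ∀ c, IsChoice (st.insert p nc) c →
      (st.insert p nc).get? c.id = some c →
      winnerChoice (st.insert p nc) = c.id ∧
      StInv (st.insert p nc) (sq + 1) (counts.insert p (counts.getD p 0 + 1))
        (some (winnerChoice (st.insert p nc))) := by
    intro c hc hgc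
    have hwid : winnerChoice (st.insert p nc) = c.id := by
      rw [hcwid]; exact isChoice_id_unique _ hnd' hseq' cw c hcw hc
    refine ⟨hwid, hcnt', hwf', hseq', hnd', hitems', c, ?_, hc, hwid.symm⟩
    rw [hwid]; exact hgc
  cases L? with
  | none =>
    have hgnone : ∀ q, st.get? q = none := by
      intro q; simp [PySem.Dict.get?, hL]
    have hvals' : ∀ d ∈ (st.insert p nc).values, d = nc := by
      intro d hd
      rcases (hvals d).mp hd with rfl | ⟨q, _, hq⟩
      · rfl
      · rw [hgnone q] at hq; cases hq
    have hch : IsChoice (st.insert p nc) nc :=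
      ⟨(hvals nc).mpr (Or.inl rfl), fun d hd => by rw [hvals' d hd],
        fun d hd _ => by rw [hvals' d hd]⟩
    obtain ⟨hwid, hinv⟩ := hfinish nc hch hget'p
    refine ⟨?_, hinv⟩
    simp only [bStep]
    rw [hwid]
  | some L =>
    obtain ⟨hitems, cL, hgL, hchL, hidL⟩ := hL
    have hvotL : votesOf st L = cL.votes := by unfold votesOf; rw [hgL]
    have hncv : nc.votes = votesOf st p + 1 := rfl
    by_cases hcond : votesOf (st.insert p nc) L ≤ votesOf (st.insert p nc) p
    · -- the fresh voter reaches the lead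
      have hch : IsChoice (st.insert p nc) nc := by
        refine ⟨(hvals nc).mpr (Or.inl rfl), ?_, ?_⟩
        · intro d hd
          rcases (hvals d).mp hd with rfl | ⟨q, hq, hgq⟩
          · exact le_refl _
          · have hd_old : d ∈ st.values := (mem_values_iff_get? st hnd d).mpr ⟨q, hgq⟩
            have h1 : d.votes ≤ cL.votes := hchL.2.1 d hd_old
            have h2 : votesOf st L ≤ votesOf (st.insert p nc) L := by
              by_cases hLp : L = p
              · subst hLp; rw [hvot'p]; omega
              · rw [hvot'ne L hLp]
            rw [hncv, ← hvot'p]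
            omega
        · intro d hd _
          rcases (hvals d).mp hd with rfl | ⟨q, hq, hgq⟩
          · exact le_refl _
          · have := (hwf q d hgq).2
            show d.seq ≤ sq
            omega
      obtain ⟨hwid, hinv⟩ := hfinish nc hch hget'p
      refine ⟨?_, hinv⟩
      have hlead : (if (counts.insert p (counts.getD p 0 + 1)).getD L 0 ≤ (counts.insert p (counts.getD p 0 + 1)).getD p 0
          then p else L) = winnerChoice (st.insert p nc) := by
        rw [hcnt' L, hcnt' p, if_pos hcond, hwid]
      simp only [bStep]
      rw [hlead]
    · -- the previous leader keeps the lead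
      have hLp : L ≠ p := by intro h; exact hcond (h ▸ le_refl _)
      have hvL' : votesOf (st.insert p nc) L = cL.votes := by rw [hvot'ne L hLp, hvotL]
      have hgL' : (st.insert p nc).get? L = some cL := by rw [hget'ne L hLp]; exact hgL
      have hpL : votesOf (st.insert p nc) p < votesOf (st.insert p nc) L := by omega
      have hch : IsChoice (st.insert p nc) cL := by
        refine ⟨(hvals cL).mpr (Or.inr ⟨L, hLp, hgL⟩), ?_, ?_⟩
        · intro d hd
          rcases (hvals d).mp hd with rfl | ⟨q, hq, hgq⟩
          · rw [hncv, ← hvot'p, ← hvL']; omega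
          · exact hchL.2.1 d ((mem_values_iff_get? st hnd d).mpr ⟨q, hgq⟩)
        · intro d hd hdv
          rcases (hvals d).mp hd with rfl | ⟨q, hq, hgq⟩
          · exfalso
            rw [hncv, ← hvot'p] at hdv
            rw [← hvL'] at hdv
            omega
          · exact hchL.2.2 d ((mem_values_iff_get? st hnd d).mpr ⟨q, hgq⟩) hdv
      have hgcL : (st.insert p nc).get? cL.id = some cL := by rw [hidL]; exact hgL'
      obtain ⟨hwid, hinv⟩ := hfinish cL hch hgcL
      refine ⟨?_, hinv⟩
      have hlead : (if (counts.insert p (counts.getD p 0 + 1)).getD L 0 ≤ (counts.insert p (counts.getD p 0 + 1)).getD p 0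
          then p else L) = winnerChoice (st.insert p nc) := by
        rw [hcnt' L, hcnt' p, if_neg hcond, hwid, hidL]
      simp only [bStep]
      rw [hlead]

-- B's fold equals the flattened run
theorem bFold_eq_sRun (es : List (Int × Int)) (st : PySem.Dict Int Cand) (sq : Int)
    (counts : PySem.Dict Int Int) (L? : Option Int) (acc : List (Int × Int))
    (hInv : StInv st sq counts L?) :
    (es.foldl bStep (counts, L?, acc)).2.2 = sRun es st sq acc := by
  induction es generalizing st sq counts L? acc with
  | nil => rfl
  | cons e es ih =>
    obtain ⟨t, p⟩ := e
    obtain ⟨hb, hinv⟩ := bStep_inv st sq counts L? acc t p hInv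
    simp only [List.foldl_cons, sRun, hb]
    exact ih _ _ _ _ _ hinv

-- processing a same-time block only rewrites the last emitted entry
theorem sRun_same_time (t : Int) (grp rest : List (Int × Int)) (hgrp : ∀ e ∈ grp, e.1 = t)
    (st : PySem.Dict Int Cand) (sq : Int) (acc0 : List (Int × Int)) :
    sRun (grp ++ rest) st sq (acc0 ++ [(t, winnerChoice st)]) =
      sRun rest
        (grp.foldl (fun (s : PySem.Dict Int Cand × Int) e => (insertOrAdd s.1 e.2 t s.2, s.2 + 1)) (st, sq)).1
        (grp.foldl (fun (s : PySem.Dict Int Cand × Int) e => (insertOrAdd s.1 e.2 t s.2, s.2 + 1)) (st, sq)).2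
        (acc0 ++ [(t, winnerChoice
          (grp.foldl (fun (s : PySem.Dict Int Cand × Int) e => (insertOrAdd s.1 e.2 t s.2, s.2 + 1)) (st, sq)).1)]) := by
  induction grp generalizing st sq with
  | nil => rfl
  | cons e grp ih =>
    obtain ⟨te, pe⟩ := e
    have hte : te = t := hgrp (te, pe) (List.mem_cons_self ..)
    subst hte
    simp only [List.cons_append, sRun, List.foldl_cons]
    have hupd : bUpd (acc0 ++ [(te, winnerChoice st)]) te
        (winnerChoice (insertOrAdd st pe te sq)) =
        acc0 ++ [(te, winnerChoice (insertOrAdd st pe te sq))] := by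
      simp [bUpd]
    rw [hupd]
    exact ih (fun e he => hgrp e (List.mem_cons_of_mem _ he)) _ _

-- A's grouped loop equals the flattened run on a time-sorted heap
theorem aLoop_eq_sRun (n : Nat) : ∀ (heap : List (Int × Int)), heap.length ≤ n →
    ∀ (st : PySem.Dict Int Cand) (acc : List (Int × Int)) (sq : Int),
    heap.Pairwise (fun a b => a.1 ≤ b.1) →
    (∀ x ∈ acc.getLast?, ∀ e ∈ heap, x.1 < e.1) →
    aLoop heap st acc sq = sRun heap st sq acc := by
  induction n with
  | zero =>
    intro heap hlen st acc sq _ _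
    have h0 : heap = [] := List.length_eq_zero_iff.mp (Nat.le_zero.mp hlen)
    subst h0
    rw [aLoop]
    rfl
  | succ n ih =>
    intro heap hlen st acc sq hs hacc
    match heap with
    | [] => rw [aLoop]; rfl
    | (t, p) :: rest =>
      rw [aLoop]
      simp only [sRun]
      have hbupd : ∀ w, bUpd acc t w = acc ++ [(t, w)] := by
        intro w
        cases hg : acc.getLast? with
        | none =>
          have h0 : acc = [] := List.getLast?_eq_none_iff.mp hg
          subst h0; simp [bUpd]
        | some x =>
          have hxt : x.1 ≠ t :=
            ne_of_lt (hacc x (by simp [hg]) (t, p) (List.mem_cons_self ..))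
          simp [bUpd, hg, hxt]
      rw [hbupd]
      have hsplit : rest.takeWhile (fun e => e.1 == t) ++ rest.dropWhile (fun e => e.1 == t) = rest :=
        List.takeWhile_append_dropWhile
      have hgrp : ∀ e ∈ rest.takeWhile (fun e => e.1 == t), e.1 = t := by
        intro e he
        simpa using List.mem_takeWhile_imp he
      conv_rhs => rw [← hsplit, sRun_same_time t _ _ hgrp]
      have hrest_pw : rest.Pairwise (fun a b => a.1 ≤ b.1) := (List.pairwise_cons.mp hs).2
      have hrest_t : ∀ e ∈ rest, t ≤ e.1 := (List.pairwise_cons.mp hs).1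
      have hrest'_pw : (rest.dropWhile (fun e => e.1 == t)).Pairwise (fun a b => a.1 ≤ b.1) :=
        hrest_pw.sublist (List.dropWhile_sublist _)
      have ht : ∀ e ∈ rest.dropWhile (fun e => e.1 == t), t < e.1 := by
        cases hr : rest.dropWhile (fun e => e.1 == t) with
        | nil => intro e he; simp at he
        | cons h' tl' =>
          have hh' : h'.1 ≠ t := by
            have hdw := List.head?_dropWhile_not (fun e => e.1 == t) rest
            rw [hr] at hdw
            simpa using hdw
          have hh'mem : h' ∈ rest := List.Sublist.mem (by rw [hr]; exact List.mem_cons_self ..) (List.dropWhile_sublist _)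
          have hth' : t < h'.1 := lt_of_le_of_ne (hrest_t h' hh'mem) (Ne.symm hh')
          intro e he
          rcases List.mem_cons.mp he with rfl | he'
          · exact hth'
          · have hpc := List.pairwise_cons.mp (hr ▸ hrest'_pw)
            exact lt_of_lt_of_le hth' (hpc.1 e he')
      have hlen' : (rest.dropWhile (fun e => e.1 == t)).length ≤ n := by
        have h1 := List.length_dropWhile_le (fun e => e.1 == t) rest
        have h2 : rest.length + 1 ≤ n + 1 := by simpa using hlen
        omega
      have hacc' : ∀ x ∈ (acc ++ [(t, winnerChoice
          ((rest.takeWhile (fun e => e.1 == t)).foldl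
            (fun (s : PySem.Dict Int Cand × Int) e => (insertOrAdd s.1 e.2 t s.2, s.2 + 1))
            (insertOrAdd st p t sq, sq + 1)).1)]).getLast?,
          ∀ e ∈ rest.dropWhile (fun e => e.1 == t), x.1 < e.1 := by
        intro x hx e he
        rw [List.getLast?_concat] at hx
        simp only [Option.mem_some_iff] at hx
        subst hx
        exact ht e he
      exact ih _ hlen' _ _ _ hrest'_pw hacc'


-- ===== VERDICT (by name: the statement is the Claim_ definition above) =====
theorem generate_winners_py_spec : Claim_equal_generate_winners_py := by
  intro persons times _
  unfold Spec_generate_winners_py generate_winners_py generate_winners_py_alt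
  have h1 := aLoop_eq_sRun (PySem.List.sorted2 (times.zip persons) (fun e => e.1) (fun e => e.2)).length
    _ (le_refl _) PySem.Dict.empty [] 0 (sorted2_pairwise_fst _) (by intro x hx; simp at hx)
  have h2 := bFold_eq_sRun (PySem.List.sorted2 (times.zip persons) (fun e => e.1) (fun e => e.2))
    PySem.Dict.empty 0 PySem.Dict.empty none []
    (by
      refine ⟨fun p => rfl, fun k c h => by simp [PySem.Dict.get?, PySem.Dict.empty] at h,
        fun k₁ k₂ c₁ c₂ _ h => by simp [PySem.Dict.get?, PySem.Dict.empty] at h, ?_, rfl⟩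
      simp [PySem.Dict.keys, PySem.Dict.empty])
  rw [h1, h2]
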